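-- pv_equiv track=rewrite | github.com/masonchenus/iGame-center | ai_backend/tools/code_optimizer.py | _add_type_hints
-- ===== SOURCE A (Python) =====
-- def _add_type_hints(code: str) -> str:
--     """Add basic type hints to Python code"""
--     lines = code.split('\n')
--     hinted_lines = []
--
--     for line in lines:
--         if line.strip().startswith('def '):
--             # Add type hints to function parameters
--             hinted_lines.append(line)
--             hinted_lines.append('    # TODO: Add specific type hints')
--         else:
--             hinted_lines.append(line)
--
--     return '\n'.join(hinted_lines)
-- ===== SOURCE B (Python) =====
-- def _add_type_hints(code: str) -> str:
--     """Add basic type hints to Python code (single pass, no line list)."""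
--     pieces = []
--     start = 0
--     n = len(code)
--     while start <= n:
--         end = code.find('\n', start)
--         if end == -1:
--             end = n
--         line = code[start:end]
--         pieces.append(line)
--         if line.strip().startswith('def '):
--             pieces.append('\n    # TODO: Add specific type hints')
--         if end < n:
--             pieces.append('\n')
--         start = end + 1
--     return ''.join(pieces)
-- ===== Notes on version B (the rewrite author's own statement) =====
-- stated objective: alternative
-- what changed: Replaces split-into-list / append-loop / join with a single index-based pass that finds each newline with str.find and emits the line, the optional TODO comment and the separator directly into the output pieces, never materialising a list of lines.
import Mathlib
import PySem

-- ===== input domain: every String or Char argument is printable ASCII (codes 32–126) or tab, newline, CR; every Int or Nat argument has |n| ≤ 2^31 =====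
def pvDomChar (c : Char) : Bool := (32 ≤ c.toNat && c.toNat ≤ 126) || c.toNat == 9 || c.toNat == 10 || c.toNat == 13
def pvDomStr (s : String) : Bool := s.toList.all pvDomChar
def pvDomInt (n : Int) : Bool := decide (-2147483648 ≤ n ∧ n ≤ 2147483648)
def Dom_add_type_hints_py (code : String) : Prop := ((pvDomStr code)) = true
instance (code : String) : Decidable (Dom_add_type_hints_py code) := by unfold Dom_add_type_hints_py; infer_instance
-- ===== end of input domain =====

-- B replaces A's split-into-lines / append-loop / join with a single pass that scans to each
-- newline and emits the line, the optional TODO comment and the separator directly (alternative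
-- decomposition, same cost).

-- ===== PORT A =====
-- literal transliteration of _add_type_hints: split on '\n', loop appending each line (and the
-- TODO line after each def line) to an accumulator list, then '\n'-join.
def add_type_hints_py (code : String) : String :=
  let lines := PySem.Chars.splitOn code.toList "\n".toList
  let hinted_lines := lines.foldl (fun acc line =>
    if PySem.Chars.startswith (PySem.Chars.strip line) "def ".toList then
      (acc ++ [line]) ++ ["    # TODO: Add specific type hints".toList]
    else
      acc ++ [line]) []
  String.mk (PySem.Chars.join "\n".toList hinted_lines)

-- ===== PORT B =====
-- transliteration of Source B's single-pass loop: each step handles one line (the chars before the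
-- next '\n'), emits it, the optional TODO piece (with its leading '\n'), and a '\n' iff a
-- newline was found (end < n), then continues after the newline.
def addTypeHintsGo (cs : List Char) : List Char :=
  let line := cs.takeWhile (fun c => c != '\n')
  line ++
  (if PySem.Chars.startswith (PySem.Chars.strip line) "def ".toList then
     '\n' :: "    # TODO: Add specific type hints".toList
   else []) ++
  (match hr : cs.dropWhile (fun c => c != '\n') with
   | [] => []
   | _ :: r => '\n' :: addTypeHintsGo r)
termination_by cs.length
decreasing_by
  have h := List.length_dropWhile_le (fun c => c != '\n') cs
  rw [hr] at h
  simp at h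
  omega

def add_type_hints_py_alt (code : String) : String :=
  String.mk (addTypeHintsGo code.toList)

-- ===== PRECONDITION & SPEC =====
def Spec_add_type_hints_py (code : String) (out : String) : Prop := out = add_type_hints_py_alt code
instance (code : String) (out : String) : Decidable (Spec_add_type_hints_py code out) := by unfold Spec_add_type_hints_py; infer_instance

-- ===== CLAIM (what is proved, stated in full; the proofs are below) =====
def Claim_equal_add_type_hints_py : Prop := ∀ (code : String), Dom_add_type_hints_py code → Spec_add_type_hints_py code (add_type_hints_py code)

-- ===== LEMMAS AND PROOFS =====

-- A's per-line predicate and the piece(s) it emits per line (proof-side names).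
def pvP (line : List Char) : Bool :=
  PySem.Chars.startswith (PySem.Chars.strip line) "def ".toList

def pvG (line : List Char) : List (List Char) :=
  if pvP line then [line, "    # TODO: Add specific type hints".toList] else [line]

-- the canonical decomposition of a string into its '\n'-separated lines
def lineSplit (cs : List Char) : List (List Char) :=
  match hr : cs.dropWhile (fun c => c != '\n') with
  | [] => [cs.takeWhile (fun c => c != '\n')]
  | _ :: r => cs.takeWhile (fun c => c != '\n') :: lineSplit r
termination_by cs.length
decreasing_by
  have h := List.length_dropWhile_le (fun c => c != '\n') cs
  rw [hr] at h
  simp at h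
  omega

lemma lineSplit_head (cs : List Char) :
    lineSplit cs = cs.takeWhile (fun c => c != '\n') :: (lineSplit cs).tail := by
  rw [lineSplit]
  split <;> simp

lemma lineSplit_nil : lineSplit [] = [[]] := by
  rw [lineSplit]
  split <;> simp_all

lemma lineSplit_newline (rest : List Char) :
    lineSplit ('\n' :: rest) = [] :: lineSplit rest := by
  rw [lineSplit]
  have hd : ('\n' :: rest).dropWhile (fun c => c != '\n') = '\n' :: rest := by
    simp [List.dropWhile]
  split <;> simp_all [List.takeWhile]

lemma lineSplit_cons_ne (c : Char) (rest : List Char) (hc : (c != '\n') = true) :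
    lineSplit (c :: rest) = (c :: rest.takeWhile (fun c => c != '\n')) :: (lineSplit rest).tail := by
  rw [lineSplit, lineSplit]
  have hd : (c :: rest).dropWhile (fun c => c != '\n') = rest.dropWhile (fun c => c != '\n') := by
    simp [List.dropWhile, hc]
  rw [hd]
  split <;> simp [List.takeWhile, hc]

lemma go_spec (fuel : Nat) (l cur : List Char) (acc : List (List Char)) (h : l.length < fuel) :
    PySem.Chars.splitOn.go ['\n'] fuel l cur acc =
      acc.reverse ++ List.modifyHead (fun t => cur.reverse ++ t) (lineSplit l) := by
  induction fuel generalizing l cur acc with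
  | zero => omega
  | succ fuel ih =>
    cases l with
    | nil =>
      rw [PySem.Chars.splitOn.go.eq_def, lineSplit_nil]
      simp
    | cons c rest =>
      by_cases hc : c = '\n'
      · subst hc
        have hpre : List.isPrefixOf ['\n'] ('\n' :: rest) = true := by
          simp [List.isPrefixOf]
        rw [PySem.Chars.splitOn.go.eq_def]
        simp only [hpre, if_true, List.length_cons, List.length_nil,
          List.drop_succ_cons, List.drop_zero]
        rw [ih rest [] (cur.reverse :: acc) (by simp at h; omega), lineSplit_newline,
          lineSplit_head rest]
        simp
      · have hpre : List.isPrefixOf ['\n'] (c :: rest) = false := by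
          simp only [List.isPrefixOf, Bool.and_true, beq_eq_false_iff_ne, ne_eq]
          exact fun h' => hc (Eq.symm h')
        rw [PySem.Chars.splitOn.go.eq_def]
        simp only [hpre, Bool.false_eq_true, if_false]
        rw [ih rest (c :: cur) acc (by simp at h; omega),
          lineSplit_cons_ne c rest (by simp [hc]), lineSplit_head rest]
        simp

lemma splitOn_eq_lineSplit (cs : List Char) :
    PySem.Chars.splitOn cs ['\n'] = lineSplit cs := by
  unfold PySem.Chars.splitOn
  rw [go_spec (cs.length + 1) cs [] [] (by omega)]
  rw [lineSplit_head cs]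
  simp

lemma flatMap_pvG_cons (x : List Char) (L : List (List Char)) :
    ∃ ys, (x :: L).flatMap pvG = x :: ys := by
  cases hP : pvP x <;> simp [pvG, hP]

lemma join_flatMap_eq_go (cs : List Char) :
    PySem.Chars.join ['\n'] ((lineSplit cs).flatMap pvG) = addTypeHintsGo cs := by
  induction cs using lineSplit.induct with
  | case1 cs hr =>
    have h1 : lineSplit cs = [cs.takeWhile (fun c => c != '\n')] := by
      rw [lineSplit.eq_def, hr]
    have h2 : addTypeHintsGo cs =
        cs.takeWhile (fun c => c != '\n') ++
        (if PySem.Chars.startswith (PySem.Chars.strip (cs.takeWhile (fun c => c != '\n')))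
              "def ".toList then
           '\n' :: "    # TODO: Add specific type hints".toList
         else []) ++ [] := by
      rw [addTypeHintsGo.eq_def, hr]
    rw [h1, h2]
    simp only [List.flatMap_cons, List.flatMap_nil, List.append_nil, pvG, pvP]
    split
    · rw [PySem.Chars.join_cons_cons, PySem.Chars.join_singleton]
      simp
    · rw [PySem.Chars.join_singleton]
      simp
  | case2 cs c r hr ih =>
    have h1 : lineSplit cs = cs.takeWhile (fun c => c != '\n') :: lineSplit r := by
      rw [lineSplit.eq_def, hr]
    have h2 : addTypeHintsGo cs =
        cs.takeWhile (fun c => c != '\n') ++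
        (if PySem.Chars.startswith (PySem.Chars.strip (cs.takeWhile (fun c => c != '\n')))
              "def ".toList then
           '\n' :: "    # TODO: Add specific type hints".toList
         else []) ++ '\n' :: addTypeHintsGo r := by
      rw [addTypeHintsGo.eq_def, hr]
    obtain ⟨ys, hys⟩ : ∃ ys, (lineSplit r).flatMap pvG = r.takeWhile (fun c => c != '\n') :: ys := by
      rw [lineSplit_head r]; exact flatMap_pvG_cons _ _
    rw [h1, h2]
    simp only [List.flatMap_cons, pvG, pvP, hys]
    rw [hys] at ih
    split
    · simp only [List.cons_append, List.nil_append,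
        PySem.Chars.join_cons_cons, ih]
      simp
    · simp only [List.cons_append, List.nil_append,
        PySem.Chars.join_cons_cons, ih]
      simp

theorem add_type_hints_py_spec : Claim_equal_add_type_hints_py := by
  intro code _
  unfold Spec_add_type_hints_py add_type_hints_py add_type_hints_py_alt
  have hsep : "\n".toList = ['\n'] := rfl
  have hfold : ∀ (L : List (List Char)),
      L.foldl (fun acc line =>
        if PySem.Chars.startswith (PySem.Chars.strip line) "def ".toList then
          (acc ++ [line]) ++ ["    # TODO: Add specific type hints".toList]
        else acc ++ [line]) [] = L.flatMap pvG := by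
    intro L
    have heq : (fun (acc : List (List Char)) (line : List Char) =>
        if PySem.Chars.startswith (PySem.Chars.strip line) "def ".toList then
          (acc ++ [line]) ++ ["    # TODO: Add specific type hints".toList]
        else acc ++ [line]) = fun acc line => acc ++ pvG line := by
      funext acc line
      simp only [pvG, pvP]
      split <;> simp
    rw [heq, PySem.List.foldl_append_eq_flatMap]
    simp
  simp only [hsep, splitOn_eq_lineSplit, hfold, join_flatMap_eq_go]
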